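-- pv_equiv track=rewrite | github.com/Zyxkim/bioinf_lab6 | align.py | group_up
-- ===== SOURCE A (Python) =====
-- def group_up(a, n):
--     result = {}
--     for i in range(len(a) - n + 1):
--         if a[i:i + n] in result:
--             result[a[i:i + n]].append(i)
--         else:
--             result[a[i:i + n]] = [i]
--     return result
-- ===== SOURCE B (Python) =====
-- def group_up(a, n):
--     idxs = range(len(a) - n + 1)
--     keys = list(dict.fromkeys(a[i:i + n] for i in idxs))
--     return {k: [i for i in idxs if a[i:i + n] == k] for k in keys}
-- ===== Notes on version B (the rewrite author's own statement) =====
-- stated objective: alternative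
-- what changed: Replaces the single-pass dict accumulation (membership test, append-or-create per position) with a two-phase scheme: first the distinct substrings in first-occurrence order via dict.fromkeys, then one filtering comprehension per key collecting its positions.
import Mathlib
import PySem

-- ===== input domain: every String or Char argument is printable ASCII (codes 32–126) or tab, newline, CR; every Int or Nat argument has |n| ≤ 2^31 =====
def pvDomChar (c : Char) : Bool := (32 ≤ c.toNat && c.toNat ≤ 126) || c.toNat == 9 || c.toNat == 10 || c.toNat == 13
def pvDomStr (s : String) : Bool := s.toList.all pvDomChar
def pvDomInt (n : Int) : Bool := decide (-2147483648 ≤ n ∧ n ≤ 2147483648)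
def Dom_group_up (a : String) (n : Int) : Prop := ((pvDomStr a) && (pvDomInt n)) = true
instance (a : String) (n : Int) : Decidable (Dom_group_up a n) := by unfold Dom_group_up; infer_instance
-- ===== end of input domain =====

-- B replaces A's one-pass dict accumulation by a two-phase scheme (distinct substrings
-- in first-occurrence order, then one positions-filter per key): a different decomposition, not faster.


-- ===== PORT A =====
def group_up (a : String) (n : Int) : List (String × List Int) :=
  ((PySem.List.pyRange 0 (PySem.Str.len a - n + 1)).foldl
    (fun result i =>
      if result.contains (PySem.Str.slice a (some i) (some (i + n))) then
        result.modify (PySem.Str.slice a (some i) (some (i + n))) [] (fun l => l ++ [i])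
      else
        result.insert (PySem.Str.slice a (some i) (some (i + n))) [i])
    PySem.Dict.empty).items

-- ===== PORT B =====
def group_up_alt (a : String) (n : Int) : List (String × List Int) :=
  let idxs := PySem.List.pyRange 0 (PySem.Str.len a - n + 1)
  let keys := PySem.List.dedup (idxs.map (fun i => PySem.Str.slice a (some i) (some (i + n))))
  keys.map (fun k => (k, idxs.filter (fun i => PySem.Str.slice a (some i) (some (i + n)) == k)))

-- ===== PRECONDITION & SPEC =====
def Spec_group_up (a : String) (n : Int) (out : List (String × List Int)) : Prop := out = group_up_alt a n
instance (a : String) (n : Int) (out : List (String × List Int)) : Decidable (Spec_group_up a n out) := by unfold Spec_group_up; infer_instance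

-- ===== CLAIM (what is proved, stated in full; the proofs are below) =====
def Claim_equal_group_up : Prop := ∀ (a : String) (n : Int), Dom_group_up a n → Spec_group_up a n (group_up a n)

-- ===== LEMMAS AND PROOFS =====

-- A's conditional branch is exactly Dict.modify (append to existing list, or start [i]).
theorem grp_branch_eq_modify (d : PySem.Dict String (List Int)) (k : String) (i : Int) :
    (if d.contains k then d.modify k [] (fun l => l ++ [i]) else d.insert k [i])
      = d.modify k [] (fun l => l ++ [i]) := by
  by_cases h : d.contains k
  · simp [h]
  · simp only [Bool.not_eq_true] at h
    simp [h, PySem.Dict.modify, PySem.Dict.getD_of_not_contains d [] h]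

-- The grouping fold characterised: distinct keys in first-occurrence order, each with its filtered payloads.
theorem grp_fold_items (ps : List (String × Int)) :
    (ps.foldl (fun d p => d.modify p.1 [] (fun l => l ++ [p.2])) PySem.Dict.empty).items
      = (PySem.Set.ofList (ps.map Prod.fst)).map
          (fun k => (k, (ps.filter (fun p => p.1 == k)).map Prod.snd)) := by
  have hnd : (ps.foldl (fun d p => d.modify p.1 [] (fun l => l ++ [p.2])) PySem.Dict.empty).keys.Nodup :=
    PySem.Dict.nodup_keys_foldl_modify_key ps Prod.fst [] (fun _ p l => l ++ [p.2]) PySem.Dict.empty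
      (by simp)
  rw [PySem.Dict.items_eq_map_keys _ hnd []]
  rw [PySem.Dict.keys_foldl_modify_key ps Prod.fst [] (fun _ p l => l ++ [p.2]) PySem.Dict.empty]
  have hkeys : PySem.Set.update (PySem.Dict.empty : PySem.Dict String (List Int)).keys (ps.map Prod.fst)
      = PySem.Set.ofList (ps.map Prod.fst) := by
    rw [PySem.Dict.keys_empty, PySem.Set.ofList_eq_foldl]
    rfl
  rw [hkeys]
  refine List.map_congr_left (fun k _ => ?_)
  rw [PySem.Dict.getD_foldl_modify_append ps PySem.Dict.empty k]
  simp [PySem.Dict.getD_empty]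

-- ===== VERDICT (by name: the statement is the Claim_ definition above) =====
theorem group_up_spec : Claim_equal_group_up := by
  intro a n _
  show group_up a n = group_up_alt a n
  unfold group_up group_up_alt
  set r := PySem.List.pyRange 0 (PySem.Str.len a - n + 1) with hr
  set f : Int → String := fun i => PySem.Str.slice a (some i) (some (i + n)) with hf
  have hA : r.foldl
      (fun result i => if result.contains (f i) then result.modify (f i) [] (fun l => l ++ [i])
        else result.insert (f i) [i]) PySem.Dict.empty
      = (r.map (fun i => (f i, i))).foldl
          (fun d p => d.modify p.1 [] (fun l => l ++ [p.2])) PySem.Dict.empty := by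
    rw [List.foldl_map]
    exact PySem.List.foldl_congr_mem _ _ _ _ (fun d i _ => grp_branch_eq_modify d (f i) i)
  rw [hA, grp_fold_items]
  have hkeys : (r.map (fun i => (f i, i))).map Prod.fst = r.map f := by
    simp [List.map_map, Function.comp]
  rw [hkeys]
  show _ = (PySem.List.dedup (r.map f)).map
      (fun k => (k, r.filter (fun i => f i == k)))
  rw [show PySem.List.dedup (r.map f) = PySem.Set.ofList (r.map f) from rfl]
  refine List.map_congr_left (fun k _ => ?_)
  have : ((r.map (fun i => (f i, i))).filter (fun p => p.1 == k)).map Prod.snd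
      = r.filter (fun i => f i == k) := by
    rw [List.filter_map, List.map_map]
    simp [Function.comp_def]
  rw [this]
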